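-- pv_equiv track=rewrite | github.com/andreignatius/ChordAnalysis | note_event_fusion.py | note_fits_chord
-- ===== SOURCE A (Python) =====
-- CHORD_TEMPLATES = {
--     'major': [0, 4, 7],
--     'minor': [0, 3, 7],
--     'dim': [0, 3, 6],
--     'aug': [0, 4, 8],
--     'sus2': [0, 2, 7],
--     'sus4': [0, 5, 7],
--     'maj7': [0, 4, 7, 11],
--     'min7': [0, 3, 7, 10],
--     'dom7': [0, 4, 7, 10],
--     '7': [0, 4, 7, 10],
--     'dim7': [0, 3, 6, 9],
--     'hdim7': [0, 3, 6, 10],  # half-diminished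
--     'add9': [0, 4, 7, 14],
--     '9': [0, 4, 7, 10, 14],
--     '6': [0, 4, 7, 9],
--     'min6': [0, 3, 7, 9],
-- }
--
-- def get_pitch_class(midi_note: int) -> int:
--     """Get pitch class (0-11) from MIDI note."""
--     return midi_note % 12
--
-- def note_fits_chord(midi_note: int, chord_root: int, chord_type: str,
--                     tolerance: int = 2) -> bool:
--     """
--     Check if a note fits within a chord (with some tolerance for passing tones).
--
--     Args:
--         midi_note: MIDI note to check
--         chord_root: Root pitch class (0-11)
--         chord_type: Chord type string
--         tolerance: How many semitones away is still acceptable (for extensions)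
--     """
--     if chord_type not in CHORD_TEMPLATES:
--         return True  # Unknown chord, accept all
--
--     pc = get_pitch_class(midi_note)
--     chord_pcs = set((chord_root + i) % 12 for i in CHORD_TEMPLATES[chord_type])
--
--     # Direct match
--     if pc in chord_pcs:
--         return True
--
--     # Check for common extensions (9th, 11th, 13th)
--     extensions = [(chord_root + 14) % 12,  # 9th
--                   (chord_root + 17) % 12,  # 11th
--                   (chord_root + 21) % 12]  # 13th
--
--     if pc in extensions:
--         return True
--
--     # Check tolerance (passing tone)
--     for chord_pc in chord_pcs:
--         if min(abs(pc - chord_pc), 12 - abs(pc - chord_pc)) <= tolerance: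
--             return True
--
--     return False
-- ===== SOURCE B (Python) =====
-- CHORD_TEMPLATES = {
--     'major': [0, 4, 7],
--     'minor': [0, 3, 7],
--     'dim': [0, 3, 6],
--     'aug': [0, 4, 8],
--     'sus2': [0, 2, 7],
--     'sus4': [0, 5, 7],
--     'maj7': [0, 4, 7, 11],
--     'min7': [0, 3, 7, 10],
--     'dom7': [0, 4, 7, 10],
--     '7': [0, 4, 7, 10],
--     'dim7': [0, 3, 6, 9],
--     'hdim7': [0, 3, 6, 10],
--     'add9': [0, 4, 7, 14],
--     '9': [0, 4, 7, 10, 14],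
--     '6': [0, 4, 7, 9],
--     'min6': [0, 3, 7, 9],
-- }
--
-- def get_pitch_class(midi_note: int) -> int:
--     return midi_note % 12
--
-- def note_fits_chord(midi_note: int, chord_root: int, chord_type: str,
--                     tolerance: int = 2) -> bool:
--     if chord_type not in CHORD_TEMPLATES:
--         return True  # Unknown chord, accept all
--     # Build one table of all acceptable pitch classes, then one membership test.
--     acceptable = set()
--     tones = [(chord_root + i) % 12 for i in CHORD_TEMPLATES[chord_type]]
--     for t in tones:
--         acceptable.add(t)
--     for ext in (14, 17, 21):
--         acceptable.add((chord_root + ext) % 12)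
--     for q in range(12):
--         for t in tones:
--             d = abs(q - t)
--             if min(d, 12 - d) <= tolerance:
--                 acceptable.add(q)
--                 break
--     return get_pitch_class(midi_note) in acceptable
-- ===== Notes on version B (the rewrite author's own statement) =====
-- stated objective: alternative
-- what changed: B precomputes one set of all acceptable pitch classes (chord tones, the three extension pcs, and every pc of range(12) within circular distance tolerance of a chord tone) and answers with a single membership test, replacing A's three sequential early-return checks including the per-chord-tone distance scan.
import Mathlib
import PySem

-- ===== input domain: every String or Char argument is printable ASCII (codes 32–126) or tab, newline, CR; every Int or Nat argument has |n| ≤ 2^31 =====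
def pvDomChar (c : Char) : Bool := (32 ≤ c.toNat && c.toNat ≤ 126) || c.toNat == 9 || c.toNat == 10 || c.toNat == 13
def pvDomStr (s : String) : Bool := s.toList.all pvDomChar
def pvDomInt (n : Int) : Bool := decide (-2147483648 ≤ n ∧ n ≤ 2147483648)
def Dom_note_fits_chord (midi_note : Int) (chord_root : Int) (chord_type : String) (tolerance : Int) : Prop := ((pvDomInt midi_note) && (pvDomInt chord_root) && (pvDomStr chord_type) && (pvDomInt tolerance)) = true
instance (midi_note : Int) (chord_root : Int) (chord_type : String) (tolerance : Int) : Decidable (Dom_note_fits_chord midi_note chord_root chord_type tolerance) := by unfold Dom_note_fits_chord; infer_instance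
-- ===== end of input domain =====

-- B replaces A's three sequential early-return checks by one precomputed set of
-- acceptable pitch classes and a single membership test (alternative decomposition, same cost).

-- ===== PORT A =====
def pvChordTemplates : PySem.Dict String (List Int) :=
  PySem.Dict.ofList
  [("major", [0, 4, 7]), ("minor", [0, 3, 7]), ("dim", [0, 3, 6]), ("aug", [0, 4, 8]),
   ("sus2", [0, 2, 7]), ("sus4", [0, 5, 7]), ("maj7", [0, 4, 7, 11]), ("min7", [0, 3, 7, 10]),
   ("dom7", [0, 4, 7, 10]), ("7", [0, 4, 7, 10]), ("dim7", [0, 3, 6, 9]), ("hdim7", [0, 3, 6, 10]),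
   ("add9", [0, 4, 7, 14]), ("9", [0, 4, 7, 10, 14]), ("6", [0, 4, 7, 9]), ("min6", [0, 3, 7, 9])]

def get_pitch_class (midi_note : Int) : Int := PySem.Int.mod midi_note 12

def note_fits_chord (midi_note : Int) (chord_root : Int) (chord_type : String) (tolerance : Int) : Bool :=
  match PySem.Dict.get? pvChordTemplates chord_type with
  | none => true  -- Unknown chord, accept all
  | some tmpl =>
    let pc := get_pitch_class midi_note
    let chord_pcs : PySem.Set Int := PySem.Set.ofList (tmpl.map (fun i => PySem.Int.mod (chord_root + i) 12))
    if PySem.Set.contains chord_pcs pc then true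
    else
      let extensions : List Int :=
        [PySem.Int.mod (chord_root + 14) 12, PySem.Int.mod (chord_root + 17) 12, PySem.Int.mod (chord_root + 21) 12]
      if extensions.contains pc then true
      else
        -- 'for chord_pc in chord_pcs: if cond: return True' — an order-independent scan of the set
        chord_pcs.any (fun cp =>
          decide (min (((pc - cp).natAbs : Int)) (12 - ((pc - cp).natAbs : Int)) ≤ tolerance))

-- ===== PORT B =====
def note_fits_chord_alt (midi_note : Int) (chord_root : Int) (chord_type : String) (tolerance : Int) : Bool :=
  match PySem.Dict.get? pvChordTemplates chord_type with
  | none => true  -- Unknown chord, accept all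
  | some tmpl =>
    let tones := tmpl.map (fun i => PySem.Int.mod (chord_root + i) 12)
    let acc1 := tones.foldl PySem.Set.add (PySem.Set.empty)
    let acc2 := ([14, 17, 21] : List Int).foldl
        (fun s e => PySem.Set.add s (PySem.Int.mod (chord_root + e) 12)) acc1
    let acc3 := (PySem.List.pyRange 0 12 1).foldl
        (fun s q =>
          -- inner 'for t in tones: … break' is an order-respecting first-hit scan = any
          if tones.any (fun t =>
              decide (min (((q - t).natAbs : Int)) (12 - ((q - t).natAbs : Int)) ≤ tolerance))
          then PySem.Set.add s q else s) acc2
    PySem.Set.contains acc3 (PySem.Int.mod midi_note 12)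

-- ===== PRECONDITION & SPEC =====
def Spec_note_fits_chord (midi_note : Int) (chord_root : Int) (chord_type : String) (tolerance : Int) (out : Bool) : Prop := out = note_fits_chord_alt midi_note chord_root chord_type tolerance
instance (midi_note : Int) (chord_root : Int) (chord_type : String) (tolerance : Int) (out : Bool) : Decidable (Spec_note_fits_chord midi_note chord_root chord_type tolerance out) := by unfold Spec_note_fits_chord; infer_instance

-- ===== CLAIM (what is proved, stated in full; the proofs are below) =====
def Claim_equal_note_fits_chord : Prop := ∀ (midi_note : Int) (chord_root : Int) (chord_type : String) (tolerance : Int), Dom_note_fits_chord midi_note chord_root chord_type tolerance → Spec_note_fits_chord midi_note chord_root chord_type tolerance (note_fits_chord midi_note chord_root chord_type tolerance)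

-- ===== LEMMAS AND PROOFS =====

theorem pv_mem_foldl_add (l : List Int) (s0 : PySem.Set Int) (x : Int) :
    x ∈ l.foldl PySem.Set.add s0 ↔ x ∈ s0 ∨ x ∈ l := by
  induction l generalizing s0 with
  | nil => simp
  | cons a l ih => simp [List.foldl_cons, ih, PySem.Set.mem_add]; tauto

theorem pv_mem_foldl_add_map (f : Int → Int) (l : List Int) (s0 : PySem.Set Int) (x : Int) :
    x ∈ l.foldl (fun s e => PySem.Set.add s (f e)) s0 ↔ x ∈ s0 ∨ x ∈ l.map f := by
  induction l generalizing s0 with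
  | nil => simp
  | cons a l ih => simp [List.foldl_cons, ih, PySem.Set.mem_add]; tauto

theorem pv_mem_foldl_add_if (p : Int → Bool) (l : List Int) (s0 : PySem.Set Int) (x : Int) :
    x ∈ l.foldl (fun s q => if p q then PySem.Set.add s q else s) s0 ↔
      x ∈ s0 ∨ (x ∈ l ∧ p x = true) := by
  induction l generalizing s0 with
  | nil => simp
  | cons a l ih =>
    simp only [List.foldl_cons, ih]
    by_cases h : p a = true
    · simp only [h, if_true, PySem.Set.mem_add, List.mem_cons]
      constructor
      · rintro ((hx | rfl) | hx) <;> tauto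
      · rintro (hx | ⟨(rfl | hx), hp⟩) <;> tauto
    · rw [if_neg h]
      simp only [List.mem_cons]
      constructor
      · rintro (hx | hx) <;> tauto
      · rintro (hx | ⟨(rfl | hx), hp⟩)
        · exact Or.inl hx
        · exact absurd hp h
        · exact Or.inr ⟨hx, hp⟩

theorem pv_body_eq (tones : List Int) (pc chord_root tolerance : Int)
    (hpc0 : 0 ≤ pc) (hpc12 : pc < 12) :
    (if PySem.Set.contains (PySem.Set.ofList tones) pc then true
     else if ([PySem.Int.mod (chord_root + 14) 12, PySem.Int.mod (chord_root + 17) 12,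
               PySem.Int.mod (chord_root + 21) 12] : List Int).contains pc then true
     else (PySem.Set.ofList tones).any (fun cp =>
        decide (min (((pc - cp).natAbs : Int)) (12 - ((pc - cp).natAbs : Int)) ≤ tolerance)))
    = PySem.Set.contains
        ((PySem.List.pyRange 0 12 1).foldl
          (fun s q =>
            if tones.any (fun t =>
                decide (min (((q - t).natAbs : Int)) (12 - ((q - t).natAbs : Int)) ≤ tolerance))
            then PySem.Set.add s q else s)
          (([14, 17, 21] : List Int).foldl
            (fun s e => PySem.Set.add s (PySem.Int.mod (chord_root + e) 12))
            (tones.foldl PySem.Set.add PySem.Set.empty)))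
        pc := by
  have h1 := pv_mem_foldl_add tones PySem.Set.empty pc
  have h2 := pv_mem_foldl_add_map (fun e => PySem.Int.mod (chord_root + e) 12)
      ([14, 17, 21] : List Int) (tones.foldl PySem.Set.add PySem.Set.empty) pc
  have h3 := pv_mem_foldl_add_if
      (fun q => tones.any (fun t =>
        decide (min (((q - t).natAbs : Int)) (12 - ((q - t).natAbs : Int)) ≤ tolerance)))
      (PySem.List.pyRange 0 12 1)
      (([14, 17, 21] : List Int).foldl
        (fun s e => PySem.Set.add s (PySem.Int.mod (chord_root + e) 12))
        (tones.foldl PySem.Set.add PySem.Set.empty)) pc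
  have hrange : pc ∈ PySem.List.pyRange 0 12 1 := by
    rw [PySem.List.mem_pyRange_one]; omega
  rw [Bool.eq_iff_iff]
  have hR : (PySem.Set.contains
        ((PySem.List.pyRange 0 12 1).foldl
          (fun s q =>
            if tones.any (fun t =>
                decide (min (((q - t).natAbs : Int)) (12 - ((q - t).natAbs : Int)) ≤ tolerance))
            then PySem.Set.add s q else s)
          (([14, 17, 21] : List Int).foldl
            (fun s e => PySem.Set.add s (PySem.Int.mod (chord_root + e) 12))
            (tones.foldl PySem.Set.add PySem.Set.empty)))
        pc = true)
      ↔ (pc ∈ tones ∨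
         pc ∈ ([14, 17, 21] : List Int).map (fun e => PySem.Int.mod (chord_root + e) 12) ∨
         ∃ t ∈ tones,
           min (((pc - t).natAbs : Int)) (12 - ((pc - t).natAbs : Int)) ≤ tolerance) := by
    simp only [PySem.Set.contains] at *
    constructor
    · intro hc
      have hm : pc ∈ (PySem.List.pyRange 0 12 1).foldl
          (fun s q =>
            if tones.any (fun t =>
                decide (min (((q - t).natAbs : Int)) (12 - ((q - t).natAbs : Int)) ≤ tolerance))
            then PySem.Set.add s q else s)
          (([14, 17, 21] : List Int).foldl
            (fun s e => PySem.Set.add s (PySem.Int.mod (chord_root + e) 12))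
            (tones.foldl PySem.Set.add PySem.Set.empty)) := by
        simpa using hc
      rcases h3.mp hm with hm2 | ⟨_, hp⟩
      · rcases h2.mp hm2 with hm1 | hext
        · rcases h1.mp hm1 with hemp | htone
          · simp [PySem.Set.empty] at hemp
          · exact Or.inl htone
        · exact Or.inr (Or.inl hext)
      · right; right
        simpa [List.any_eq_true] using hp
    · intro hc
      have hm : pc ∈ (PySem.List.pyRange 0 12 1).foldl
          (fun s q =>
            if tones.any (fun t =>
                decide (min (((q - t).natAbs : Int)) (12 - ((q - t).natAbs : Int)) ≤ tolerance))
            then PySem.Set.add s q else s)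
          (([14, 17, 21] : List Int).foldl
            (fun s e => PySem.Set.add s (PySem.Int.mod (chord_root + e) 12))
            (tones.foldl PySem.Set.add PySem.Set.empty)) := by
        rcases hc with htone | hext | htol
        · exact h3.mpr (Or.inl (h2.mpr (Or.inl (h1.mpr (Or.inr htone)))))
        · exact h3.mpr (Or.inl (h2.mpr (Or.inr hext)))
        · refine h3.mpr (Or.inr ⟨hrange, ?_⟩)
          simpa [List.any_eq_true] using htol
      simpa using hm
  rw [hR]
  by_cases hc1 : PySem.Set.contains (PySem.Set.ofList tones) pc = true
  · have htone : pc ∈ tones := by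
      simpa [PySem.Set.contains, PySem.Set.mem_ofList] using hc1
    simp [htone]
  · by_cases hc2 : (([PySem.Int.mod (chord_root + 14) 12, PySem.Int.mod (chord_root + 17) 12,
        PySem.Int.mod (chord_root + 21) 12] : List Int).contains pc) = true
    · have hext : pc ∈ ([14, 17, 21] : List Int).map (fun e => PySem.Int.mod (chord_root + e) 12) := by
        simp only [List.contains_eq_mem, decide_eq_true_eq] at hc2
        simpa [List.map] using hc2
      simp [hext]
    · have hnt : ¬ pc ∈ tones := by
        intro hmem
        exact hc1 (by simpa [PySem.Set.contains, PySem.Set.mem_ofList] using hmem)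
      have hne : ¬ pc ∈ ([14, 17, 21] : List Int).map (fun e => PySem.Int.mod (chord_root + e) 12) := by
        intro hmem
        apply hc2
        simp only [List.contains_eq_mem, decide_eq_true_eq]
        simpa [List.map] using hmem
      simp only [hc1, hc2, if_false, Bool.false_eq_true]
      simp only [List.any_eq_true, PySem.Set.mem_ofList, decide_eq_true_eq]
      tauto

-- ===== VERDICT (by name: the statement is the Claim_ definition above) =====
theorem note_fits_chord_spec : Claim_equal_note_fits_chord := by
  intro midi_note chord_root chord_type tolerance _
  unfold Spec_note_fits_chord note_fits_chord note_fits_chord_alt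
  cases h : PySem.Dict.get? pvChordTemplates chord_type with
  | none => rfl
  | some tmpl =>
    exact pv_body_eq (tmpl.map (fun i => PySem.Int.mod (chord_root + i) 12))
      (PySem.Int.mod midi_note 12) chord_root tolerance
      (PySem.Int.mod_nonneg midi_note (by norm_num))
      (PySem.Int.mod_lt midi_note (by norm_num))
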